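-- pv_equiv track=rewrite | github.com/prachi128/playground-prodigy-pawns | backend/main.py | level_from_rating
-- ===== SOURCE A (Python) =====
-- LEVEL_MIN = 1
--
-- LEVEL_MAX = 15
--
-- _RATING_THRESHOLDS = [300, 500, 700, 900, 1100, 1300, 1500, 1700, 1900, 2100, 2300, 2500, 2700, 2900]
--
-- def level_from_rating(rating: int) -> int:
--     """Compute level 1-15 from player rating. Level is driven only by rating."""
--     r = max(100, rating)
--     level = LEVEL_MIN
--     for t in _RATING_THRESHOLDS:
--         if r >= t:
--             level += 1
--         else:
--             break
--     return min(level, LEVEL_MAX)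
-- ===== SOURCE B (Python) =====
-- def level_from_rating(rating: int) -> int:
--     """Compute level 1-15 from player rating. Level is driven only by rating."""
--     r = max(100, rating)
--     if r < 300:
--         return 1
--     return min(15, 2 + (r - 300) // 200)
-- ===== Notes on version B (the rewrite author's own statement) =====
-- stated objective: simpler
-- what changed: Replaced the loop over the threshold list with a closed-form arithmetic formula exploiting that the thresholds form a uniform arithmetic grid.
import Mathlib
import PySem

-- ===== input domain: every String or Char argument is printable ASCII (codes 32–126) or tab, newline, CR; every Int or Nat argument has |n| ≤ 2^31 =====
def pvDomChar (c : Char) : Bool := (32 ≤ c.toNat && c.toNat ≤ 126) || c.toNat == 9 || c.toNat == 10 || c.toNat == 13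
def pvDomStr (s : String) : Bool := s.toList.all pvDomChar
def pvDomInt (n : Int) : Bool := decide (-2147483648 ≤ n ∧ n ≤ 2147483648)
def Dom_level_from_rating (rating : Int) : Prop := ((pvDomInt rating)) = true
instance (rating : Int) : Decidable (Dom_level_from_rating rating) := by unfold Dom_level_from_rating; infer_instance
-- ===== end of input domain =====

-- B replaces A's loop over the threshold list with a closed-form formula (objective: simpler).

-- ===== PORT A =====
def pvRatingThresholds : List Int :=
  [300, 500, 700, 900, 1100, 1300, 1500, 1700, 1900, 2100, 2300, 2500, 2700, 2900]

-- the 'for t in _RATING_THRESHOLDS: if r >= t: level += 1 else: break' loop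
def pvLoopA (r : Int) : List Int → Int → Int
  | [], level => level
  | t :: ts, level => if r ≥ t then pvLoopA r ts (level + 1) else level

def level_from_rating (rating : Int) : Int :=
  min (pvLoopA (max 100 rating) pvRatingThresholds 1) 15

-- ===== PORT B =====
def level_from_rating_alt (rating : Int) : Int :=
  let r := max 100 rating
  if r < 300 then 1
  else min 15 (2 + PySem.Int.floordiv (r - 300) 200)

-- ===== PRECONDITION & SPEC =====
def Spec_level_from_rating (rating : Int) (out : Int) : Prop := out = level_from_rating_alt rating
instance (rating : Int) (out : Int) : Decidable (Spec_level_from_rating rating out) := by unfold Spec_level_from_rating; infer_instance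

-- ===== CLAIM (what is proved, stated in full; the proofs are below) =====
def Claim_equal_level_from_rating : Prop := ∀ (rating : Int), Dom_level_from_rating rating → Spec_level_from_rating rating (level_from_rating rating)

-- ===== LEMMAS AND PROOFS =====

-- the thresholds form the arithmetic grid a, a+200, …, a+200(n-1); describe A's loop on any such grid
def pvGrid : Int → Nat → List Int
  | _, 0 => []
  | a, Nat.succ n => a :: pvGrid (a + 200) n

theorem pvLoopA_grid (n : Nat) : ∀ (a lvl r : Int),
    pvLoopA r (pvGrid a n) lvl = if r < a then lvl else lvl + min (n : Int) ((r - a) / 200 + 1) := by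
  induction n with
  | zero =>
    intro a lvl r
    simp only [pvGrid, pvLoopA]
    split_ifs <;> omega
  | succ n ih =>
    intro a lvl r
    simp only [pvGrid, pvLoopA]
    rw [ih]
    split_ifs <;> push_cast <;> omega

theorem pvThresholds_grid : pvRatingThresholds = pvGrid 300 14 := by rfl

-- ===== VERDICT (by name: the statement is the Claim_ definition above) =====
theorem level_from_rating_spec : Claim_equal_level_from_rating := by
  intro rating _
  unfold Spec_level_from_rating level_from_rating level_from_rating_alt
  rw [pvThresholds_grid, pvLoopA_grid]
  simp only [PySem.Int.floordiv_eq_ediv_of_pos (show (0:Int) < 200 by norm_num)]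
  split_ifs <;> omega
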